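-- pv_equiv track=rewrite | github.com/efeslab/UopRepl-Artifact | simulators/scarab_getRawTrace/scripts/kmeans_cluster.py | change_to_serial
-- ===== SOURCE A (Python) =====
-- def change_to_serial(x1):
--     label = 0
--     x2 = []
--     pre_num = x1[0]
--     for i in (x1):
--         if i!=pre_num:
--             label+=1
--         x2.append(label)
--         pre_num = i
--     return(x2)
-- ===== SOURCE B (Python) =====
-- def change_to_serial(x1):
--     # Run-length view: scan each maximal run of equal values once and
--     # emit its label repeated run-length times.
--     out = []
--     label = 0
--     rest = x1
--     while rest:
--         v = rest[0]
--         run = 1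
--         while run < len(rest) and rest[run] == v:
--             run += 1
--         out.extend([label] * run)
--         label += 1
--         rest = rest[run:]
--     return out
-- ===== Notes on version B (the rewrite author's own statement) =====
-- stated objective: alternative
-- what changed: B materialises the output from maximal runs of equal values (run-length grouping, extend with [label]*run) instead of A's per-element loop tracking a previous value.
import Mathlib
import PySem

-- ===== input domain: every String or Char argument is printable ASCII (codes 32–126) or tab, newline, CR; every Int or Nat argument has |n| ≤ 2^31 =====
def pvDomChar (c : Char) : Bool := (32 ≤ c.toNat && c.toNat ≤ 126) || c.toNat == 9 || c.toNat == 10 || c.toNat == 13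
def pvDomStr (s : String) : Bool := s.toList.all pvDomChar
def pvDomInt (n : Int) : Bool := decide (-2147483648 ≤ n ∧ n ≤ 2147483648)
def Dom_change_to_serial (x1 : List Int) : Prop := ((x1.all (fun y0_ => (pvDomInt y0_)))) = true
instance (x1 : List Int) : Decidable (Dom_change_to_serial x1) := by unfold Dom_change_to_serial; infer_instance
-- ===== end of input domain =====

-- B relabels via maximal runs of equal values (run-length grouping) instead of A's
-- per-element previous-value tracking (alternative decomposition, same cost).


-- ===== PORT A =====
-- A: label = 0; x2 = []; pre_num = x1[0]; for i in x1: if i != pre_num: label += 1;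
--    x2.append(label); pre_num = i.  x1[0] raises IndexError on []; excluded by Pre_.
def stepA (s : Int × List Int × Int) (i : Int) : Int × List Int × Int :=
  let label := if i ≠ s.2.2 then s.1 + 1 else s.1
  (label, s.2.1 ++ [label], i)

def change_to_serial (x1 : List Int) : List Int :=
  match x1 with
  | [] => []  -- Python raises IndexError here (x1[0]); outside Pre_change_to_serial
  | h :: _ =>
    let st := x1.foldl stepA ((0 : Int), ([] : List Int), h)
    st.2.1

-- ===== PORT B =====
-- B: while rest: take the maximal run of rest[0], extend out with [label]*run, advance.
def change_to_serial_alt (x1 : List Int) : List Int :=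
  serialGo 0 x1
where
  serialGo (label : Int) : List Int → List Int
    | [] => []
    | h :: t =>
      List.replicate (1 + (t.takeWhile (· == h)).length) label
        ++ serialGo (label + 1) (t.dropWhile (· == h))
  termination_by l => l.length
  decreasing_by
    simpa using Nat.lt_succ_of_le (List.length_dropWhile_le (· == h) t)

-- ===== PRECONDITION & SPEC =====
-- Pre_ excludes only the empty list, on which A raises IndexError (x1[0]).
def Pre_change_to_serial (x1 : List Int) : Prop := x1 ≠ []
instance (x1 : List Int) : Decidable (Pre_change_to_serial x1) := by unfold Pre_change_to_serial; infer_instance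
def pvWitness_change_to_serial : List Int := [3, 3, 1, 2]

def Spec_change_to_serial (x1 : List Int) (out : List Int) : Prop := out = change_to_serial_alt x1
instance (x1 : List Int) (out : List Int) : Decidable (Spec_change_to_serial x1 out) := by unfold Spec_change_to_serial; infer_instance

-- ===== CLAIM (what is proved, stated in full; the proofs are below) =====
def Claim_equal_change_to_serial : Prop := ∀ (x1 : List Int), Dom_change_to_serial x1 → Pre_change_to_serial x1 → Spec_change_to_serial x1 (change_to_serial x1)

-- ===== LEMMAS AND PROOFS =====

-- Pointwise recursion equivalent to A's fold (label, pre) state, output only.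
def goA (label pre : Int) : List Int → List Int
  | [] => []
  | i :: t =>
    let label' := if i ≠ pre then label + 1 else label
    label' :: goA label' i t

theorem foldlA_eq (l : List Int) (label : Int) (acc : List Int) (pre : Int) :
    (l.foldl stepA (label, acc, pre)).2.1 = acc ++ goA label pre l := by
  induction l generalizing label acc pre with
  | nil => simp [goA]
  | cons i t ih =>
    rw [List.foldl_cons, show stepA (label, acc, pre) i =
      ((if i ≠ pre then label + 1 else label),
        acc ++ [if i ≠ pre then label + 1 else label], i) from rfl, ih]
    simp [goA]

theorem goA_eq_serialGo (l : List Int) (label pre : Int) :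
    goA label pre l =
      List.replicate ((l.takeWhile (· == pre)).length) label
        ++ change_to_serial_alt.serialGo (label + 1) (l.dropWhile (· == pre)) := by
  induction l generalizing label pre with
  | nil => simp [goA, change_to_serial_alt.serialGo]
  | cons i t ih =>
    by_cases h : i = pre
    · subst h
      simp [goA, List.replicate_succ]
      exact ih label i
    · simp only [goA, if_pos h, List.takeWhile, List.dropWhile,
        show (i == pre) = false from by simp [h]]
      rw [change_to_serial_alt.serialGo, ih (label + 1) i,
        Nat.add_comm 1, List.replicate_succ, List.cons_append]
      simp

-- ===== VERDICT (by name: the statement is the Claim_ definition above) =====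
theorem change_to_serial_spec : Claim_equal_change_to_serial := by
  intro x1 _ hpre
  unfold Spec_change_to_serial
  match x1, hpre with
  | h :: t, _ =>
    show (((h :: t).foldl _ ((0 : Int), ([] : List Int), h)).2.1 : List Int) = _
    rw [foldlA_eq, goA_eq_serialGo]
    rw [change_to_serial_alt, change_to_serial_alt.serialGo]
    simp [Nat.add_comm]
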